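-- pv_equiv track=rewrite | github.com/CSCI-570-Final/DP | efficient_3.py | cost_linear
-- ===== SOURCE A (Python) =====
-- GAP_PENALTY = 30
--
-- MISMATCH_COST = {
--     'A': {'A': 0,   'C': 110, 'G': 48,  'T': 94},
--     'C': {'A': 110, 'C': 0,   'G': 118, 'T': 48},
--     'G': {'A': 48,  'C': 118, 'G': 0,   'T': 110},
--     'T': {'A': 94,  'C': 48,  'G': 110, 'T': 0},
-- }
--
-- def get_alpha(c1, c2):
--     if c1 == '_' or c2 == '_':
--         return GAP_PENALTY
--     return MISMATCH_COST[c1][c2]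
--
-- def cost_linear(x, y):
--     m = len(x)
--     prev = []
--     for i in range(m + 1):
--         cost = i * GAP_PENALTY
--         prev.append(cost)
--     curr = []
--     for i in range(m + 1):
--         curr.append(0)
--     for j in range(1, len(y) + 1):
--         curr[0] = j * GAP_PENALTY
--         for i in range(1, m + 1):
--             match_cost  = prev[i-1] + get_alpha(x[i-1], y[j-1])
--             delete_cost = prev[i]   + GAP_PENALTY
--             insert_cost = curr[i-1] + GAP_PENALTY
--             if match_cost <= delete_cost and match_cost <= insert_cost:
--                 curr[i] = match_cost
--             elif delete_cost <= insert_cost: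
--                 curr[i] = delete_cost
--             else:
--                 curr[i] = insert_cost
--         new_prev = []
--         for value in curr:
--             new_prev.append(value)
--         prev = new_prev
--         curr = []
--         for i in range(m + 1):
--             curr.append(0)
--     return prev
-- ===== SOURCE B (Python) =====
-- GAP_PENALTY = 30
--
-- MISMATCH_COST = {
--     'A': {'A': 0,   'C': 110, 'G': 48,  'T': 94},
--     'C': {'A': 110, 'C': 0,   'G': 118, 'T': 48},
--     'G': {'A': 48,  'C': 118, 'G': 0,   'T': 110},
--     'T': {'A': 94,  'C': 48,  'G': 110, 'T': 0},
-- }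
--
-- def get_alpha(c1, c2):
--     if c1 == '_' or c2 == '_':
--         return GAP_PENALTY
--     return MISMATCH_COST[c1][c2]
--
-- def cost_linear(x, y):
--     # Transposed DP: roll a row over y for each prefix of x, collecting the
--     # last column entry as we go.
--     n = len(y)
--     row = [j * GAP_PENALTY for j in range(n + 1)]
--     out = [row[n]]
--     for i in range(1, len(x) + 1):
--         new = [i * GAP_PENALTY]
--         for j in range(1, n + 1):
--             new.append(min(row[j - 1] + get_alpha(x[i - 1], y[j - 1]),
--                            new[j - 1] + GAP_PENALTY,
--                            row[j] + GAP_PENALTY))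
--         row = new
--         out.append(row[n])
--     return out
-- ===== Notes on version B (the rewrite author's own statement) =====
-- stated objective: simpler
-- what changed: Same DP recurrence but transposed traversal: B rolls a single row over y for each prefix of x and collects the requested last-column values online with min(), instead of A's column-rolling over y with an if-chain and explicit zero-filled buffers.
import Mathlib
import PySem

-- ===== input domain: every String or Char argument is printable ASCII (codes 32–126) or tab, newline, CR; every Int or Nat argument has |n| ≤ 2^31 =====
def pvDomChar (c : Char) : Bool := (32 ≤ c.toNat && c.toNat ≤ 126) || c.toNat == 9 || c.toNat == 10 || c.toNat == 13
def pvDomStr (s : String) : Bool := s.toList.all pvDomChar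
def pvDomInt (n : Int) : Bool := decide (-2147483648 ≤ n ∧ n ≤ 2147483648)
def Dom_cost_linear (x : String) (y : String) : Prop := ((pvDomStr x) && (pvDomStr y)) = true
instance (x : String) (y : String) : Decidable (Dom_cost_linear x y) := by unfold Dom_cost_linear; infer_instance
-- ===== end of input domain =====

-- B replaces A's column-rolling over y (if-chain, zero-filled buffers) by a transposed
-- row-rolling over x collecting the last column online with min(); same cost, shorter code.

-- ===== PORT A =====
def pvGAP : Int := 30

def pvMISMATCH : PySem.Dict Char (PySem.Dict Char Int) :=
  PySem.Dict.ofList [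
    ('A', PySem.Dict.ofList [('A', 0), ('C', 110), ('G', 48), ('T', 94)]),
    ('C', PySem.Dict.ofList [('A', 110), ('C', 0), ('G', 118), ('T', 48)]),
    ('G', PySem.Dict.ofList [('A', 48), ('C', 118), ('G', 0), ('T', 110)]),
    ('T', PySem.Dict.ofList [('A', 94), ('C', 48), ('G', 110), ('T', 0)])]

-- get_alpha; a failed lookup is Python's KeyError, excluded by Pre_ (the default 0 is never reached there)
def getAlpha (c1 : Char) (c2 : Char) : Int :=
  if c1 = '_' || c2 = '_' then pvGAP
  else (((pvMISMATCH.get? c1).bind (fun d => d.get? c2)).getD 0)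

-- Python only indexes x[i-1], y[j-1], prev[..], curr[..] at nonnegative in-range
-- positions, so List.getD with a dummy default is exact here.
def cost_linear (x : String) (y : String) : List Int :=
  let xs := x.toList
  let ys := y.toList
  let m := xs.length
  let prev := (List.range (m + 1)).foldl (fun acc (i : Nat) => acc ++ [(i : Int) * pvGAP]) []
  let curr := (List.range (m + 1)).foldl (fun acc _ => acc ++ [(0 : Int)]) []
  let st := (List.range ys.length).foldl (fun (st : List Int × List Int) jt =>
      let j : Nat := jt + 1
      let prev := st.1
      let curr := st.2.set 0 ((j : Int) * pvGAP)
      let curr := (List.range m).foldl (fun curr it =>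
          let i : Nat := it + 1
          let match_cost := prev.getD (i - 1) 0 + getAlpha (xs.getD (i - 1) ' ') (ys.getD (j - 1) ' ')
          let delete_cost := prev.getD i 0 + pvGAP
          let insert_cost := curr.getD (i - 1) 0 + pvGAP
          if match_cost ≤ delete_cost ∧ match_cost ≤ insert_cost then curr.set i match_cost
          else if delete_cost ≤ insert_cost then curr.set i delete_cost
          else curr.set i insert_cost) curr
      let new_prev := curr.foldl (fun acc v => acc ++ [v]) []
      (new_prev, (List.range (m + 1)).foldl (fun acc _ => acc ++ [(0 : Int)]) []))
    (prev, curr)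
  st.1

-- ===== PORT B =====
def cost_linear_alt (x : String) (y : String) : List Int :=
  let xs := x.toList
  let ys := y.toList
  let n := ys.length
  let row := (List.range (n + 1)).map (fun (j : Nat) => (j : Int) * pvGAP)
  let out := [row.getD n 0]
  let st := (List.range xs.length).foldl (fun (st : List Int × List Int) it =>
      let i : Nat := it + 1
      let row := st.1
      let newRow := (List.range n).foldl (fun new jt =>
          let j : Nat := jt + 1
          new ++ [min (row.getD (j - 1) 0 + getAlpha (xs.getD (i - 1) ' ') (ys.getD (j - 1) ' '))
                    (min (new.getD (j - 1) 0 + pvGAP) (row.getD j 0 + pvGAP))])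
        [(i : Int) * pvGAP]
      (newRow, st.2 ++ [newRow.getD n 0]))
    (row, out)
  st.2

-- ===== PRECONDITION & SPEC =====
-- Pre_ excludes exactly the inputs where Python's get_alpha raises KeyError (a non-'_'
-- character of x paired with a non-'_' character of y, either outside 'ACGT').
def okACGT (c : Char) : Bool := c == 'A' || c == 'C' || c == 'G' || c == 'T'

def Pre_cost_linear (x : String) (y : String) : Prop :=
  (x.toList.all (fun c1 => y.toList.all (fun c2 =>
    c1 == '_' || c2 == '_' || (okACGT c1 && okACGT c2)))) = true
instance (x : String) (y : String) : Decidable (Pre_cost_linear x y) := by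
  unfold Pre_cost_linear; infer_instance

def pvWitness_cost_linear : String × String := ("AC", "G_T")

def Spec_cost_linear (x : String) (y : String) (out : List Int) : Prop := out = cost_linear_alt x y
instance (x : String) (y : String) (out : List Int) : Decidable (Spec_cost_linear x y out) := by unfold Spec_cost_linear; infer_instance

-- ===== CLAIM (what is proved, stated in full; the proofs are below) =====
def Claim_equal_cost_linear : Prop := ∀ (x : String) (y : String), Dom_cost_linear x y → Pre_cost_linear x y → Spec_cost_linear x y (cost_linear x y)

-- ===== LEMMAS AND PROOFS =====

-- the alignment cost table both programs tabulate
def dpT (xs : List Char) (ys : List Char) : Nat → Nat → Int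
  | 0, j => (j : Int) * 30
  | i + 1, 0 => ((i : Int) + 1) * 30
  | i + 1, j + 1 =>
      min (dpT xs ys i j + getAlpha (xs.getD i ' ') (ys.getD j ' '))
        (min (dpT xs ys (i + 1) j + 30) (dpT xs ys i (j + 1) + 30))

lemma dpT_zero_left (xs ys : List Char) (j : Nat) : dpT xs ys 0 j = (j : Int) * 30 := by
  cases j <;> simp [dpT]

lemma dpT_zero_right (xs ys : List Char) (i : Nat) : dpT xs ys i 0 = (i : Int) * 30 := by
  cases i <;> simp [dpT]

lemma dpT_succ_succ (xs ys : List Char) (i j : Nat) :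
    dpT xs ys (i + 1) (j + 1) =
      min (dpT xs ys i j + getAlpha (xs.getD i ' ') (ys.getD j ' '))
        (min (dpT xs ys (i + 1) j + 30) (dpT xs ys i (j + 1) + 30)) := by
  simp [dpT]

lemma mapRange_set {L : Nat} (f : Nat → Int) (n : Nat) (a : Int) (_hn : n < L) :
    ((List.range L).map f).set n a = (List.range L).map (fun k => if k = n then a else f k) := by
  apply List.ext_getElem
  · simp
  · intro k h1 h2
    simp only [List.getElem_set, List.getElem_map, List.getElem_range]
    simp only [List.length_set, List.length_map, List.length_range] at h1
    by_cases hk : n = k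
    · simp [hk]
    · simp [hk, Ne.symm hk]

lemma zerosFold (L : Nat) :
    (List.range L).foldl (fun acc _ => acc ++ [(0 : Int)]) [] = (List.range L).map (fun _ => (0 : Int)) := by
  rw [PySem.List.foldl_append_singleton_eq_map (fun _ : Nat => (0 : Int)), List.nil_append]

-- ----- A side -----

lemma innerA (xs ys : List Char) (t : Nat) :
    ∀ (M : Nat), M ≤ xs.length →
      (List.range M).foldl (fun curr it =>
          let i : Nat := it + 1
          let match_cost := ((List.range (xs.length + 1)).map (fun k => dpT xs ys k t)).getD (i - 1) 0
            + getAlpha (xs.getD (i - 1) ' ') (ys.getD (t + 1 - 1) ' ')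
          let delete_cost := ((List.range (xs.length + 1)).map (fun k => dpT xs ys k t)).getD i 0 + pvGAP
          let insert_cost := curr.getD (i - 1) 0 + pvGAP
          if match_cost ≤ delete_cost ∧ match_cost ≤ insert_cost then curr.set i match_cost
          else if delete_cost ≤ insert_cost then curr.set i delete_cost
          else curr.set i insert_cost)
        ((List.range (xs.length + 1)).map (fun k => if k = 0 then dpT xs ys 0 (t + 1) else 0))
      = (List.range (xs.length + 1)).map (fun k => if k ≤ M then dpT xs ys k (t + 1) else 0) := by
  intro M
  induction M with
  | zero =>
      intro _
      simp only [List.range_zero, List.foldl_nil]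
      congr 1
      funext k
      rcases k with _ | k <;> simp
  | succ M ih =>
      intro hM
      rw [show List.range (M + 1) = List.range M ++ [M] from List.range_succ,
          List.foldl_append, ih (by omega)]
      simp only [List.foldl_cons, List.foldl_nil]
      rw [PySem.List.getD_map_range _ _ _ _ (by omega : M + 1 - 1 < xs.length + 1),
          PySem.List.getD_map_range _ _ _ _ (by omega : M + 1 < xs.length + 1),
          PySem.List.getD_map_range _ _ _ _ (by omega : M + 1 - 1 < xs.length + 1)]
      simp only [Nat.add_sub_cancel]
      rw [show (if M ≤ M then dpT xs ys M (t + 1) else 0) = dpT xs ys M (t + 1) from if_pos (le_refl M)]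
      have hd : dpT xs ys (M + 1) (t + 1) =
          min (dpT xs ys M t + getAlpha (xs.getD M ' ') (ys.getD t ' '))
            (min (dpT xs ys (M + 1) t + pvGAP) (dpT xs ys M (t + 1) + pvGAP)) := by
        rw [dpT_succ_succ]; norm_num [pvGAP]
      have hstep : ∀ v : Int, v = dpT xs ys (M + 1) (t + 1) →
          ((List.range (xs.length + 1)).map (fun k => if k ≤ M then dpT xs ys k (t + 1) else 0)).set (M + 1) v
          = (List.range (xs.length + 1)).map (fun k => if k ≤ M + 1 then dpT xs ys k (t + 1) else 0) := by
        intro v hv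
        subst hv
        rw [mapRange_set _ (M + 1) _ (by omega)]
        congr 1
        funext k
        by_cases hk : k = M + 1
        · simp [hk]
        · by_cases hk2 : k ≤ M <;>
            simp [hk, hk2, show k ≤ M + 1 ↔ k ≤ M from by omega]
      split_ifs with h1 h2 <;> exact hstep _ (by rw [hd]; omega)

lemma outerA (xs ys : List Char) :
    ∀ (T : Nat),
      (List.range T).foldl (fun (st : List Int × List Int) jt =>
          let j : Nat := jt + 1
          let prev := st.1
          let curr := st.2.set 0 ((j : Int) * pvGAP)
          let curr := (List.range xs.length).foldl (fun curr it =>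
              let i : Nat := it + 1
              let match_cost := prev.getD (i - 1) 0 + getAlpha (xs.getD (i - 1) ' ') (ys.getD (j - 1) ' ')
              let delete_cost := prev.getD i 0 + pvGAP
              let insert_cost := curr.getD (i - 1) 0 + pvGAP
              if match_cost ≤ delete_cost ∧ match_cost ≤ insert_cost then curr.set i match_cost
              else if delete_cost ≤ insert_cost then curr.set i delete_cost
              else curr.set i insert_cost) curr
          let new_prev := curr.foldl (fun acc v => acc ++ [v]) []
          (new_prev, (List.range (xs.length + 1)).foldl (fun acc _ => acc ++ [(0 : Int)]) []))
        ((List.range (xs.length + 1)).map (fun k => dpT xs ys k 0),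
         (List.range (xs.length + 1)).foldl (fun acc _ => acc ++ [(0 : Int)]) [])
      = ((List.range (xs.length + 1)).map (fun k => dpT xs ys k T),
         (List.range (xs.length + 1)).foldl (fun acc _ => acc ++ [(0 : Int)]) []) := by
  intro T
  induction T with
  | zero => simp
  | succ T ih =>
      rw [show List.range (T + 1) = List.range T ++ [T] from List.range_succ,
          List.foldl_append, ih, zerosFold]
      simp only [List.foldl_cons, List.foldl_nil]
      have hset : ((List.range (xs.length + 1)).map (fun _ => (0 : Int))).set 0 (((T + 1 : Nat) : Int) * pvGAP)
          = (List.range (xs.length + 1)).map (fun k => if k = 0 then dpT xs ys 0 (T + 1) else 0) := by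
        rw [mapRange_set _ 0 _ (by omega)]
        congr 1
        funext k
        rw [dpT_zero_left]
        push_cast
        rfl
      rw [hset, innerA xs ys T xs.length (le_refl _),
          PySem.List.foldl_append_singleton_eq_map (fun v => v)]
      simp only [List.nil_append, List.map_map]
      refine (Prod.mk.injEq _ _ _ _).mpr ⟨?_, rfl⟩
      apply List.map_congr_left
      intro k hk
      rw [List.mem_range] at hk
      simp [show k ≤ xs.length from by omega]

lemma costA_eq (x y : String) :
    cost_linear x y = (List.range (x.toList.length + 1)).map (fun i => dpT x.toList y.toList i y.toList.length) := by
  simp only [cost_linear]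
  have hprev : (List.range (x.toList.length + 1)).foldl (fun acc (i : Nat) => acc ++ [(i : Int) * pvGAP]) []
      = (List.range (x.toList.length + 1)).map (fun k => dpT x.toList y.toList k 0) := by
    rw [PySem.List.foldl_append_singleton_eq_map (fun i : Nat => (i : Int) * pvGAP), List.nil_append]
    exact List.map_congr_left (fun k _ => by rw [dpT_zero_right]; simp [pvGAP])
  rw [hprev]
  exact congrArg Prod.fst (outerA x.toList y.toList y.toList.length)

-- ----- B side -----

lemma innerB (xs ys : List Char) (it : Nat) :
    ∀ (K : Nat), K ≤ ys.length →
      (List.range K).foldl (fun new jt =>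
          let j : Nat := jt + 1
          new ++ [min (((List.range (ys.length + 1)).map (fun k => dpT xs ys it k)).getD (j - 1) 0
                    + getAlpha (xs.getD (it + 1 - 1) ' ') (ys.getD (j - 1) ' '))
                    (min (new.getD (j - 1) 0 + pvGAP)
                      (((List.range (ys.length + 1)).map (fun k => dpT xs ys it k)).getD j 0 + pvGAP))])
        [((it + 1 : Nat) : Int) * pvGAP]
      = (List.range (K + 1)).map (fun k => dpT xs ys (it + 1) k) := by
  intro K
  induction K with
  | zero =>
      intro _
      simp only [List.range_zero, List.foldl_nil, Nat.zero_add, List.range_one,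
        List.map_cons, List.map_nil]
      rw [dpT_zero_right]
      norm_num [pvGAP]
  | succ K ih =>
      intro hK
      rw [show List.range (K + 1) = List.range K ++ [K] from List.range_succ,
          List.foldl_append, ih (by omega)]
      simp only [List.foldl_cons, List.foldl_nil, Nat.add_sub_cancel]
      rw [PySem.List.getD_map_range _ _ _ _ (by omega : K < ys.length + 1),
          PySem.List.getD_map_range _ _ _ _ (by omega : K + 1 < ys.length + 1),
          PySem.List.getD_map_range _ _ _ _ (by omega : K < K + 1)]
      rw [show (List.range (K + 1 + 1)) = List.range (K + 1) ++ [K + 1] from List.range_succ,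
          List.map_append]
      congr 1
      simp only [List.map_cons, List.map_nil]
      rw [dpT_succ_succ]
      norm_num [pvGAP]

lemma costB_eq (x y : String) :
    cost_linear_alt x y = (List.range (x.toList.length + 1)).map (fun i => dpT x.toList y.toList i y.toList.length) := by
  simp only [cost_linear_alt]
  have hrow0 : (fun j : Nat => (j : Int) * pvGAP) = (fun k : Nat => dpT x.toList y.toList 0 k) :=
    funext (fun k => by rw [dpT_zero_left]; rfl)
  rw [hrow0]
  have main : ∀ (T : Nat), T ≤ x.toList.length →
      (List.range T).foldl (fun (st : List Int × List Int) it =>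
          let i : Nat := it + 1
          let row := st.1
          let newRow := (List.range y.toList.length).foldl (fun new jt =>
              let j : Nat := jt + 1
              new ++ [min (row.getD (j - 1) 0 + getAlpha (x.toList.getD (i - 1) ' ') (y.toList.getD (j - 1) ' '))
                        (min (new.getD (j - 1) 0 + pvGAP) (row.getD j 0 + pvGAP))])
            [(i : Int) * pvGAP]
          (newRow, st.2 ++ [newRow.getD y.toList.length 0]))
        ((List.range (y.toList.length + 1)).map (fun k => dpT x.toList y.toList 0 k),
         [((List.range (y.toList.length + 1)).map (fun k => dpT x.toList y.toList 0 k)).getD y.toList.length 0])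
      = ((List.range (y.toList.length + 1)).map (fun k => dpT x.toList y.toList T k),
         (List.range (T + 1)).map (fun i => dpT x.toList y.toList i y.toList.length)) := by
    intro T
    induction T with
    | zero =>
        intro _
        simp only [List.range_zero, List.foldl_nil]
        rw [PySem.List.getD_map_range _ _ _ _ (by omega : y.toList.length < y.toList.length + 1)]
        simp
    | succ T ih =>
        intro hT
        rw [show List.range (T + 1) = List.range T ++ [T] from List.range_succ,
            List.foldl_append, ih (by omega)]
        simp only [List.foldl_cons, List.foldl_nil, Nat.add_sub_cancel]
        have hinner := innerB x.toList y.toList T y.toList.length (le_refl _)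
        simp only [Nat.add_sub_cancel] at hinner
        rw [hinner]
        refine (Prod.mk.injEq _ _ _ _).mpr ⟨rfl, ?_⟩
        rw [PySem.List.getD_map_range _ _ _ _ (by omega : y.toList.length < y.toList.length + 1),
            show (List.range (T + 1 + 1)) = List.range (T + 1) ++ [T + 1] from List.range_succ,
            List.map_append]
        simp
  have := main x.toList.length (le_refl _)
  simp only at this ⊢
  rw [this]

-- ===== VERDICT (by name: the statement is the Claim_ definition above) =====
theorem cost_linear_spec : Claim_equal_cost_linear := by
  intro x y _ _
  unfold Spec_cost_linear
  rw [costA_eq, costB_eq]
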